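-- pv_equiv track=rewrite | github.com/liang-victor/adventofcode_python | 2022/day_15.py | ranges_covered
-- ===== SOURCE A (Python) =====
-- def manhattan_distance(coord_a, coord_b):
--     (ax, ay) = coord_a
--     (bx, by) = coord_b
--
--     return abs(bx - ax) + abs(by - ay)
--
-- def manhattan_chord_at_y(center_coord, manhattan_radius, target_y):
--     """Returns the two points that intersect y from the given manhattan circle
--     """
--
--     (x, y) = center_coord
--     delta_y = abs(target_y - y)
--     if delta_y <= manhattan_radius:
--         delta_x = manhattan_radius - delta_y
--         return [(x - delta_x, target_y), (x + delta_x, target_y)]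
--     return []
--
-- def join_ranges(list_of_ranges):
--     list_of_ranges = sorted(list_of_ranges)
--     resulting_ranges = []
--     current_accumulated_range = list_of_ranges[0]
--
--     for current_range in list_of_ranges[1:]:
--         ranges_touch = current_range[0] <= current_accumulated_range[1] + 1
--         if ranges_touch:
--             current_accumulated_range[1] = max(current_accumulated_range[1], current_range[1])
--         else:
--             resulting_ranges.append(current_accumulated_range)
--             current_accumulated_range = current_range
--     resulting_ranges.append(current_accumulated_range)
--     return resulting_ranges
--
-- def ranges_covered(sensor_beacon_pairs, y_of_interest):
--     ranges = []
--     for sensor, beacon in sensor_beacon_pairs: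
--         x_range_covered = [coord[0] for coord in manhattan_chord_at_y(sensor,
--                                                                       manhattan_distance(sensor, beacon),
--                                                                       y_of_interest)]
--
--         if x_range_covered:
--             ranges.append(x_range_covered)
--
--     return join_ranges(ranges)
-- ===== SOURCE B (Python) =====
-- def ranges_covered(sensor_beacon_pairs, y_of_interest):
--     """Incremental insertion-merge: maintain a sorted list of disjoint
--     (gap >= 2) intervals and merge each sensor's chord into it; no global sort."""
--
--     def insert(merged, lo, hi):
--         if not merged:
--             return [(lo, hi)]
--         (a, b) = merged[0]
--         rest = merged[1:]
--         if hi + 1 < a: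
--             return [(lo, hi), (a, b)] + rest
--         if b + 1 < lo:
--             return [(a, b)] + insert(rest, lo, hi)
--         return insert(rest, min(a, lo), max(b, hi))
--
--     merged = []
--     for (sensor, beacon) in sensor_beacon_pairs:
--         (sx, sy) = sensor
--         (bx, by) = beacon
--         radius = abs(bx - sx) + abs(by - sy)
--         slack = radius - abs(y_of_interest - sy)
--         if slack >= 0:
--             merged = insert(merged, sx - slack, sx + slack)
--     return [[a, b] for (a, b) in merged]
-- ===== Notes on version B (the rewrite author's own statement) =====
-- stated objective: alternative
-- what changed: A collects all chord intervals, sorts them and merges in one scan with an in-place accumulator; B never sorts: it folds over the sensors once, merging each chord into a maintained sorted list of disjoint intervals by recursive insertion.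
-- crash fix: On inputs where no sensor's manhattan circle reaches the row y_of_interest (in particular an empty pair list) A raises IndexError on list_of_ranges[0]; B returns []. — e.g. on ranges_covered([], 0): A raises IndexError, B returns []
import Mathlib
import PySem

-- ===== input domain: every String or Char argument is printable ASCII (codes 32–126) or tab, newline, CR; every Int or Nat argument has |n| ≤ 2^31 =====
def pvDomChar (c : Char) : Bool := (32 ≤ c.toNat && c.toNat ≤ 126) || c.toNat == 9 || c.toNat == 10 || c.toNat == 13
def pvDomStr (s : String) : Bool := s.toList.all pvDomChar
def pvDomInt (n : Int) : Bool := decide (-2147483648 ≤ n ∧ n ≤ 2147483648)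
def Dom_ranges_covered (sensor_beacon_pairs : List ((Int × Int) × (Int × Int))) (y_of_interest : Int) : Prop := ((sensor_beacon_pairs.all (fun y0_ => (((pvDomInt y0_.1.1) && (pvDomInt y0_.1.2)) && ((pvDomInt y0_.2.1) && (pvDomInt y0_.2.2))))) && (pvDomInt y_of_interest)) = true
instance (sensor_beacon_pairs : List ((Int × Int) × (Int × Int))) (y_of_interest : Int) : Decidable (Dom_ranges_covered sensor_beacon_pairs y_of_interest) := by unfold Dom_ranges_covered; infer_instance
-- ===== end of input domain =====

-- B replaces A's sort-then-merge-scan by incremental insertion of each sensor chord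
-- into a maintained list of disjoint merged intervals (objective: alternative algorithm).

-- ===== PORT A =====
def manhattan_distance (coord_a coord_b : Int × Int) : Int :=
  |coord_b.1 - coord_a.1| + |coord_b.2 - coord_a.2|

def manhattan_chord_at_y (center_coord : Int × Int) (manhattan_radius target_y : Int) :
    List (Int × Int) :=
  let delta_y := |target_y - center_coord.2|
  if delta_y ≤ manhattan_radius then
    let delta_x := manhattan_radius - delta_y
    [(center_coord.1 - delta_x, target_y), (center_coord.1 + delta_x, target_y)]
  else []

-- the for-loop of join_ranges (current accumulated range, output built so far);
-- current_accumulated_range[1] = max(...) is the in-place update List.set 1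
def join_go : List (List Int) → List Int → List (List Int) → List (List Int)
  | [], acc, out => out ++ [acc]
  | cur :: rest, acc, out =>
    if PySem.List.pyGetD cur 0 0 ≤ PySem.List.pyGetD acc 1 0 + 1 then
      join_go rest (acc.set 1 (max (PySem.List.pyGetD acc 1 0) (PySem.List.pyGetD cur 1 0))) out
    else
      join_go rest cur (out ++ [acc])

def join_ranges (list_of_ranges : List (List Int)) : List (List Int) :=
  match PySem.List.sorted list_of_ranges (fun x => x) false with
  | [] => []          -- Python raises IndexError here (list_of_ranges[0]); excluded by Pre_
  | h :: t => join_go t h []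

def ranges_covered (sensor_beacon_pairs : List ((Int × Int) × (Int × Int))) (y_of_interest : Int) : List (List Int) :=
  join_ranges (sensor_beacon_pairs.foldl (fun rs sb =>
    let x_range_covered :=
      (manhattan_chord_at_y sb.1 (manhattan_distance sb.1 sb.2) y_of_interest).map (fun c => c.1)
    if x_range_covered = [] then rs else rs ++ [x_range_covered]) [])

-- ===== PORT B =====
def insert_merge : List (Int × Int) → Int → Int → List (Int × Int)
  | [], lo, hi => [(lo, hi)]
  | (a, b) :: rest, lo, hi =>
    if hi + 1 < a then (lo, hi) :: (a, b) :: rest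
    else if b + 1 < lo then (a, b) :: insert_merge rest lo hi
    else insert_merge rest (min a lo) (max b hi)

def ranges_covered_alt (sensor_beacon_pairs : List ((Int × Int) × (Int × Int))) (y_of_interest : Int) : List (List Int) :=
  (sensor_beacon_pairs.foldl (fun m sb =>
      let radius := |sb.2.1 - sb.1.1| + |sb.2.2 - sb.1.2|
      let slack := radius - |y_of_interest - sb.1.2|
      if 0 ≤ slack then insert_merge m (sb.1.1 - slack) (sb.1.1 + slack) else m) []).map
    (fun p => [p.1, p.2])

-- ===== PRECONDITION & SPEC =====
-- Pre_ excludes exactly the inputs where no sensor's manhattan circle reaches the row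
-- y_of_interest: there the chord list is empty and A raises IndexError on list_of_ranges[0].
def Pre_ranges_covered (sensor_beacon_pairs : List ((Int × Int) × (Int × Int))) (y_of_interest : Int) : Prop :=
  ∃ sb ∈ sensor_beacon_pairs,
    |y_of_interest - sb.1.2| ≤ |sb.2.1 - sb.1.1| + |sb.2.2 - sb.1.2|
instance (sensor_beacon_pairs : List ((Int × Int) × (Int × Int))) (y_of_interest : Int) : Decidable (Pre_ranges_covered sensor_beacon_pairs y_of_interest) := by unfold Pre_ranges_covered; infer_instance

def pvWitness_ranges_covered : (List ((Int × Int) × (Int × Int))) × Int := ([((0, 0), (0, 0))], 0)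

-- On inputs where every sensor's circle misses the row y_of_interest (in particular the
-- empty pair list) A raises IndexError; B naturally returns the empty list of ranges.
def Raises_ranges_covered (sensor_beacon_pairs : List ((Int × Int) × (Int × Int))) (y_of_interest : Int) : Prop :=
  ∀ sb ∈ sensor_beacon_pairs,
    |sb.2.1 - sb.1.1| + |sb.2.2 - sb.1.2| < |y_of_interest - sb.1.2|
instance (sensor_beacon_pairs : List ((Int × Int) × (Int × Int))) (y_of_interest : Int) : Decidable (Raises_ranges_covered sensor_beacon_pairs y_of_interest) := by unfold Raises_ranges_covered; infer_instance
def pvRaiseWitness_ranges_covered : (List ((Int × Int) × (Int × Int))) × Int := ([], 0)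
def pvRaiseWitnessOut_ranges_covered : List (List Int) := []

def Spec_ranges_covered (sensor_beacon_pairs : List ((Int × Int) × (Int × Int))) (y_of_interest : Int) (out : List (List Int)) : Prop := out = ranges_covered_alt sensor_beacon_pairs y_of_interest
instance (sensor_beacon_pairs : List ((Int × Int) × (Int × Int))) (y_of_interest : Int) (out : List (List Int)) : Decidable (Spec_ranges_covered sensor_beacon_pairs y_of_interest out) := by unfold Spec_ranges_covered; infer_instance

-- ===== CLAIM (what is proved, stated in full; the proofs are below) =====
def Claim_equal_ranges_covered : Prop := ∀ (sensor_beacon_pairs : List ((Int × Int) × (Int × Int))) (y_of_interest : Int), Dom_ranges_covered sensor_beacon_pairs y_of_interest → Pre_ranges_covered sensor_beacon_pairs y_of_interest → Spec_ranges_covered sensor_beacon_pairs y_of_interest (ranges_covered sensor_beacon_pairs y_of_interest)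

def Claim_raises_ranges_covered : Prop := (∀ (sensor_beacon_pairs : List ((Int × Int) × (Int × Int))) (y_of_interest : Int), Dom_ranges_covered sensor_beacon_pairs y_of_interest → Raises_ranges_covered sensor_beacon_pairs y_of_interest → ¬ Pre_ranges_covered sensor_beacon_pairs y_of_interest) ∧ (Dom_ranges_covered (pvRaiseWitness_ranges_covered.1) (pvRaiseWitness_ranges_covered.2) ∧ Raises_ranges_covered (pvRaiseWitness_ranges_covered.1) (pvRaiseWitness_ranges_covered.2) ∧ ranges_covered_alt (pvRaiseWitness_ranges_covered.1) (pvRaiseWitness_ranges_covered.2) = pvRaiseWitnessOut_ranges_covered)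

-- ===== LEMMAS AND PROOFS =====

-- slack of a sensor-beacon pair at row y: radius minus vertical distance
def slackOf (sb : (Int × Int) × (Int × Int)) (y : Int) : Int :=
  (|sb.2.1 - sb.1.1| + |sb.2.2 - sb.1.2|) - |y - sb.1.2|

-- clean forms of the two fold bodies
def aStep (y : Int) (rs : List (List Int)) (sb : (Int × Int) × (Int × Int)) : List (List Int) :=
  if 0 ≤ slackOf sb y then rs ++ [[sb.1.1 - slackOf sb y, sb.1.1 + slackOf sb y]] else rs

def bStep (y : Int) (m : List (Int × Int)) (sb : (Int × Int) × (Int × Int)) : List (Int × Int) :=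
  if 0 ≤ slackOf sb y then insert_merge m (sb.1.1 - slackOf sb y) (sb.1.1 + slackOf sb y) else m

theorem aStep_eq (y : Int) : (fun rs sb =>
    let x_range_covered :=
      (manhattan_chord_at_y sb.1 (manhattan_distance sb.1 sb.2) y).map
        (fun c => c.1)
    if x_range_covered = [] then rs else rs ++ [x_range_covered]) = aStep y := by
  funext rs sb
  by_cases h : |y - sb.1.2| ≤ manhattan_distance sb.1 sb.2
  · have h1 : (manhattan_chord_at_y sb.1 (manhattan_distance sb.1 sb.2) y).map
        (fun c => c.1) =
        [sb.1.1 - (manhattan_distance sb.1 sb.2 - |y - sb.1.2|),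
         sb.1.1 + (manhattan_distance sb.1 sb.2 - |y - sb.1.2|)] := by
      simp [manhattan_chord_at_y, h]
    show (if _ = ([] : List Int) then rs else rs ++ _) = aStep y rs sb
    rw [h1, if_neg (by simp)]
    unfold aStep slackOf manhattan_distance at *
    rw [if_pos (by omega)]
  · have h1 : (manhattan_chord_at_y sb.1 (manhattan_distance sb.1 sb.2) y).map
        (fun c => c.1) = ([] : List Int) := by
      simp [manhattan_chord_at_y, h]
    show (if _ = ([] : List Int) then rs else rs ++ _) = aStep y rs sb
    rw [h1, if_pos rfl]
    unfold aStep slackOf manhattan_distance at *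
    rw [if_neg (by omega)]

theorem bStep_eq (y : Int) : (fun m sb =>
    let radius := |sb.2.1 - sb.1.1| + |sb.2.2 - sb.1.2|
    let slack := radius - |y - sb.1.2|
    if 0 ≤ slack then insert_merge m (sb.1.1 - slack) (sb.1.1 + slack) else m) = bStep y := by
  funext m sb; rfl

-- membership of an integer in a list of [lo, hi] intervals / of (lo, hi) intervals
def memL (x : Int) (l : List (List Int)) : Prop := ∃ a b : Int, [a, b] ∈ l ∧ a ≤ x ∧ x ≤ b
def memP (x : Int) (l : List (Int × Int)) : Prop := ∃ p ∈ l, p.1 ≤ x ∧ x ≤ p.2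
-- every element is a 2-list [a, b] with a ≤ b
def ShapeL (l : List (List Int)) : Prop := ∀ r ∈ l, ∃ a b : Int, r = [a, b] ∧ a ≤ b
-- normal form: well-formed intervals, strictly increasing with gaps ≥ 2
def NormL (l : List (List Int)) : Prop :=
  ShapeL l ∧ l.Pairwise (fun r s => r.getD 1 0 + 2 ≤ s.getD 0 0)
def NormP (l : List (Int × Int)) : Prop :=
  (∀ p ∈ l, p.1 ≤ p.2) ∧ l.Pairwise (fun p q => p.2 + 2 ≤ q.1)
-- x is covered by some sensor's chord at row y
def Covered (pairs : List ((Int × Int) × (Int × Int))) (y x : Int) : Prop :=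
  ∃ sb ∈ pairs, 0 ≤ slackOf sb y ∧ sb.1.1 - slackOf sb y ≤ x ∧ x ≤ sb.1.1 + slackOf sb y

theorem memL_nil (x : Int) : ¬ memL x [] := by
  rintro ⟨a, b, h, -⟩; simp at h

theorem memL_cons (x c d : Int) (l : List (List Int)) :
    memL x ([c, d] :: l) ↔ (c ≤ x ∧ x ≤ d) ∨ memL x l := by
  unfold memL
  constructor
  · rintro ⟨a, b, hm, h1, h2⟩
    rcases List.mem_cons.mp hm with h | h
    · obtain ⟨rfl, rfl⟩ : a = c ∧ b = d := by simpa using h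
      exact Or.inl ⟨h1, h2⟩
    · exact Or.inr ⟨a, b, h, h1, h2⟩
  · rintro (⟨h1, h2⟩ | ⟨a, b, hm, h1, h2⟩)
    · exact ⟨c, d, List.mem_cons_self, h1, h2⟩
    · exact ⟨a, b, List.mem_cons_of_mem _ hm, h1, h2⟩

theorem memP_cons (x : Int) (p : Int × Int) (l : List (Int × Int)) :
    memP x (p :: l) ↔ (p.1 ≤ x ∧ x ≤ p.2) ∨ memP x l := by
  simp [memP]

theorem memL_perm {l m : List (List Int)} (h : l.Perm m) (x : Int) :
    memL x l ↔ memL x m := by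
  unfold memL
  constructor <;> rintro ⟨a, b, hm, h1, h2⟩
  · exact ⟨a, b, h.mem_iff.mp hm, h1, h2⟩
  · exact ⟨a, b, h.mem_iff.mpr hm, h1, h2⟩

theorem memL_map (x : Int) (l : List (Int × Int)) :
    memL x (l.map (fun p => [p.1, p.2])) ↔ memP x l := by
  unfold memL memP
  constructor
  · rintro ⟨a, b, hm, h1, h2⟩
    obtain ⟨p, hp, he⟩ := List.mem_map.mp hm
    obtain ⟨rfl, rfl⟩ : a = p.1 ∧ b = p.2 := by simpa using he.symm
    exact ⟨p, hp, h1, h2⟩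
  · rintro ⟨p, hp, h1, h2⟩
    exact ⟨p.1, p.2, List.mem_map.mpr ⟨p, hp, rfl⟩, h1, h2⟩

theorem normL_map {l : List (Int × Int)} (h : NormP l) :
    NormL (l.map (fun p => [p.1, p.2])) := by
  obtain ⟨h1, h2⟩ := h
  constructor
  · rintro r hr
    obtain ⟨p, hp, rfl⟩ := List.mem_map.mp hr
    exact ⟨p.1, p.2, rfl, h1 p hp⟩
  · refine List.pairwise_map.mpr (h2.imp ?_)
    intro p q hpq; simpa using hpq

-- head low bound in a normal-form list
theorem normL_head_le {a b : Int} {l : List (List Int)} (h : NormL ([a, b] :: l)) :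
    ∀ x, memL x ([a, b] :: l) → a ≤ x := by
  obtain ⟨hs, hp⟩ := h
  intro x hx
  rcases (memL_cons x a b l).mp hx with ⟨h1, -⟩ | ⟨e, f, hm, h1, -⟩
  · exact h1
  · have hab : a ≤ b := by
      obtain ⟨a', b', he, hle⟩ := hs [a, b] List.mem_cons_self
      obtain ⟨rfl, rfl⟩ : a = a' ∧ b = b' := by simpa using he
      exact hle
    have := (List.pairwise_cons.mp hp).1 [e, f] hm
    simp at this
    omega

-- tail members of a normal-form list lie above head hi + 2
theorem normL_tail_lo {a b : Int} {l : List (List Int)} (h : NormL ([a, b] :: l)) :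
    ∀ x, memL x l → b + 2 ≤ x := by
  obtain ⟨hs, hp⟩ := h
  rintro x ⟨e, f, hm, h1, -⟩
  have := (List.pairwise_cons.mp hp).1 [e, f] hm
  simp at this
  omega

theorem normL_unique : ∀ (l m : List (List Int)), NormL l → NormL m →
    (∀ x, memL x l ↔ memL x m) → l = m := by
  intro l
  induction l with
  | nil =>
    rintro (_ | ⟨r, m⟩) _ hm hx
    · rfl
    · obtain ⟨c, d, rfl, hcd⟩ := hm.1 r List.mem_cons_self
      exact absurd ((hx c).mpr ((memL_cons c c d m).mpr (Or.inl ⟨le_refl c, hcd⟩)))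
        (memL_nil c)
  | cons r l ih =>
    rintro m hl hm hx
    obtain ⟨a, b, rfl, hab⟩ := hl.1 r List.mem_cons_self
    rcases m with _ | ⟨s, m⟩
    · exact absurd ((hx a).mp ((memL_cons a a b l).mpr (Or.inl ⟨le_refl a, hab⟩)))
        (memL_nil a)
    obtain ⟨c, d, rfl, hcd⟩ := hm.1 s List.mem_cons_self
    have hac : a = c := by
      have h1 : c ≤ a := normL_head_le hm a ((hx a).mp
        ((memL_cons a a b l).mpr (Or.inl ⟨le_refl a, hab⟩)))
      have h2 : a ≤ c := normL_head_le hl c ((hx c).mpr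
        ((memL_cons c c d m).mpr (Or.inl ⟨le_refl c, hcd⟩)))
      omega
    subst hac
    have hbd : b = d := by
      by_contra hbd
      rcases lt_or_gt_of_ne hbd with hlt | hgt
      · have hmem : memL (b + 1) ([a, d] :: m) :=
          (memL_cons (b + 1) a d m).mpr (Or.inl (by omega))
        rcases (memL_cons (b + 1) a b l).mp ((hx (b + 1)).mpr hmem) with h | h
        · omega
        · have := normL_tail_lo hl (b + 1) h; omega
      · have hmem : memL (d + 1) ([a, b] :: l) :=
          (memL_cons (d + 1) a b l).mpr (Or.inl (by omega))
        rcases (memL_cons (d + 1) a d m).mp ((hx (d + 1)).mp hmem) with h | h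
        · omega
        · have := normL_tail_lo hm (d + 1) h; omega
    subst hbd
    have htails : ∀ x, memL x l ↔ memL x m := by
      intro x
      constructor
      · intro h
        have hb2 := normL_tail_lo hl x h
        rcases (memL_cons x a b m).mp ((hx x).mp ((memL_cons x a b l).mpr (Or.inr h))) with
          h' | h'
        · omega
        · exact h'
      · intro h
        have hb2 := normL_tail_lo hm x h
        rcases (memL_cons x a b l).mp ((hx x).mpr ((memL_cons x a b m).mpr (Or.inr h))) with
          h' | h'
        · omega
        · exact h'
    have hln : NormL l := ⟨fun r hr => hl.1 r (List.mem_cons_of_mem _ hr),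
      (List.pairwise_cons.mp hl.2).2⟩
    have hmn : NormL m := ⟨fun r hr => hm.1 r (List.mem_cons_of_mem _ hr),
      (List.pairwise_cons.mp hm.2).2⟩
    rw [ih m hln hmn htails]

-- ---- B side ----

theorem insert_lows : ∀ (m : List (Int × Int)) (lo hi c : Int),
    (∀ p ∈ m, c ≤ p.1) → c ≤ lo → ∀ q ∈ insert_merge m lo hi, c ≤ q.1 := by
  intro m
  induction m with
  | nil => intro lo hi c _ hc q hq; simp [insert_merge] at hq; subst hq; exact hc
  | cons p rest ih =>
    rintro lo hi c hall hc q hq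
    obtain ⟨a, b⟩ := p
    simp only [insert_merge] at hq
    split_ifs at hq with h1 h2
    · rcases List.mem_cons.mp hq with rfl | hq
      · exact hc
      · exact hall q hq
    · rcases List.mem_cons.mp hq with rfl | hq
      · exact hall (a, b) List.mem_cons_self
      · exact ih lo hi c (fun p hp => hall p (List.mem_cons_of_mem _ hp)) hc q hq
    · refine ih (min a lo) (max b hi) c (fun p hp => hall p (List.mem_cons_of_mem _ hp)) ?_ q hq
      have := hall (a, b) List.mem_cons_self
      simp only [min_def]
      split_ifs <;> omega

theorem insert_normP : ∀ (m : List (Int × Int)) (lo hi : Int),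
    NormP m → lo ≤ hi → NormP (insert_merge m lo hi) := by
  intro m
  induction m with
  | nil =>
    intro lo hi _ hlh
    constructor
    · intro p hp; simp [insert_merge] at hp; subst hp; exact hlh
    · simp [insert_merge]
  | cons p rest ih =>
    rintro lo hi ⟨hwf, hpw⟩ hlh
    obtain ⟨a, b⟩ := p
    have hab : a ≤ b := hwf (a, b) List.mem_cons_self
    have hrest : NormP rest := ⟨fun p hp => hwf p (List.mem_cons_of_mem _ hp),
      (List.pairwise_cons.mp hpw).2⟩
    simp only [insert_merge]
    split_ifs with h1 h2
    · constructor
      · rintro p hp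
        rcases List.mem_cons.mp hp with rfl | hp
        · exact hlh
        · exact hwf p hp
      · refine List.pairwise_cons.mpr ⟨?_, hpw⟩
        rintro q hq
        rcases List.mem_cons.mp hq with rfl | hq
        · simp; omega
        · have := (List.pairwise_cons.mp hpw).1 q hq; omega
    · obtain ⟨hwf', hpw'⟩ := ih lo hi hrest hlh
      refine ⟨?_, List.pairwise_cons.mpr ⟨?_, hpw'⟩⟩
      · rintro p hp
        rcases List.mem_cons.mp hp with rfl | hp
        · exact hab
        · exact hwf' p hp
      · intro q hq
        exact insert_lows rest lo hi (b + 2) (fun p hp => (List.pairwise_cons.mp hpw).1 p hp)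
          (by omega) q hq
    · exact ih (min a lo) (max b hi) hrest (by
        simp only [min_def, max_def]; split_ifs <;> omega)

theorem insert_memP : ∀ (m : List (Int × Int)) (lo hi x : Int),
    (∀ p ∈ m, p.1 ≤ p.2) → lo ≤ hi →
    (memP x (insert_merge m lo hi) ↔ memP x m ∨ (lo ≤ x ∧ x ≤ hi)) := by
  intro m
  induction m with
  | nil => intro lo hi x _ _; simp [insert_merge, memP]
  | cons p rest ih =>
    rintro lo hi x hwf hlh
    obtain ⟨a, b⟩ := p
    have hab : a ≤ b := hwf (a, b) List.mem_cons_self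
    have hwf' : ∀ p ∈ rest, p.1 ≤ p.2 := fun p hp => hwf p (List.mem_cons_of_mem _ hp)
    simp only [insert_merge]
    split_ifs with h1 h2
    · simp only [memP_cons]; tauto
    · simp only [memP_cons, ih lo hi x hwf' hlh]; tauto
    · rw [ih (min a lo) (max b hi) x hwf'
        (by simp only [min_def, max_def]; split_ifs <;> omega), memP_cons]
      simp only [min_le_iff, le_max_iff]
      constructor
      · rintro (h | ⟨h3 | h3, h4 | h4⟩)
        · exact Or.inl (Or.inr h)
        · exact Or.inl (Or.inl ⟨h3, h4⟩)
        · rcases le_or_gt x b with h5 | h5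
          · exact Or.inl (Or.inl ⟨h3, h5⟩)
          · exact Or.inr ⟨by omega, h4⟩
        · rcases le_or_gt a x with h5 | h5
          · exact Or.inl (Or.inl ⟨h5, h4⟩)
          · exact Or.inr ⟨h3, by omega⟩
        · exact Or.inr ⟨h3, h4⟩
      · rintro ((⟨h3, h4⟩ | h) | ⟨h3, h4⟩)
        · exact Or.inr ⟨Or.inl h3, Or.inl h4⟩
        · exact Or.inl h
        · exact Or.inr ⟨Or.inr h3, Or.inr h4⟩

theorem bfold (y : Int) : ∀ (pairs : List ((Int × Int) × (Int × Int))) (m : List (Int × Int)),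
    NormP m →
    NormP (pairs.foldl (bStep y) m) ∧
    ∀ x, (memP x (pairs.foldl (bStep y) m) ↔ memP x m ∨ Covered pairs y x) := by
  intro pairs
  induction pairs with
  | nil => intro m hm; refine ⟨hm, fun x => ?_⟩; simp [Covered]
  | cons sb rest ih =>
    intro m hm
    simp only [List.foldl_cons, bStep]
    by_cases h : 0 ≤ slackOf sb y
    · simp only [if_pos h]
      have hm' := insert_normP m (sb.1.1 - slackOf sb y) (sb.1.1 + slackOf sb y) hm (by omega)
      obtain ⟨h1, h2⟩ := ih _ hm'
      refine ⟨h1, fun x => ?_⟩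
      rw [h2 x, insert_memP m _ _ x hm.1 (by omega)]
      simp only [Covered, List.mem_cons]
      constructor
      · rintro ((h' | h') | h')
        · exact Or.inl h'
        · exact Or.inr ⟨sb, Or.inl rfl, h, h'⟩
        · obtain ⟨q, hq, hq2⟩ := h'; exact Or.inr ⟨q, Or.inr hq, hq2⟩
      · rintro (h' | ⟨q, hq | hq, hq2⟩)
        · exact Or.inl (Or.inl h')
        · subst hq; exact Or.inl (Or.inr hq2.2)
        · exact Or.inr ⟨q, hq, hq2⟩
    · simp only [if_neg h]
      obtain ⟨h1, h2⟩ := ih m hm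
      refine ⟨h1, fun x => ?_⟩
      rw [h2 x]
      simp only [Covered, List.mem_cons]
      constructor
      · rintro (h' | ⟨q, hq, hq2⟩)
        · exact Or.inl h'
        · exact Or.inr ⟨q, Or.inr hq, hq2⟩
      · rintro (h' | ⟨q, hq | hq, hq2⟩)
        · exact Or.inl h'
        · subst hq; exact absurd hq2.1 h
        · exact Or.inr ⟨q, hq, hq2⟩

-- ---- A side ----

theorem memL_append_one (x a b : Int) (l : List (List Int)) :
    memL x (l ++ [[a, b]]) ↔ memL x l ∨ (a ≤ x ∧ x ≤ b) := by
  unfold memL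
  constructor
  · rintro ⟨c, d, hm, h1, h2⟩
    rcases List.mem_append.mp hm with h | h
    · exact Or.inl ⟨c, d, h, h1, h2⟩
    · obtain ⟨rfl, rfl⟩ : c = a ∧ d = b := by simpa using h
      exact Or.inr ⟨h1, h2⟩
  · rintro (⟨c, d, hm, h1, h2⟩ | ⟨h1, h2⟩)
    · exact ⟨c, d, List.mem_append.mpr (Or.inl hm), h1, h2⟩
    · exact ⟨a, b, List.mem_append.mpr (Or.inr (by simp)), h1, h2⟩

theorem afold (y : Int) : ∀ (pairs : List ((Int × Int) × (Int × Int))) (acc : List (List Int)),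
    ShapeL acc →
    ShapeL (pairs.foldl (aStep y) acc) ∧
    ∀ x, (memL x (pairs.foldl (aStep y) acc) ↔ memL x acc ∨ Covered pairs y x) := by
  intro pairs
  induction pairs with
  | nil => intro acc hacc; refine ⟨hacc, fun x => ?_⟩; simp [Covered]
  | cons sb rest ih =>
    intro acc hacc
    simp only [List.foldl_cons, aStep]
    by_cases h : 0 ≤ slackOf sb y
    · simp only [if_pos h]
      have hacc' : ShapeL (acc ++ [[sb.1.1 - slackOf sb y, sb.1.1 + slackOf sb y]]) := by
        rintro r hr
        rcases List.mem_append.mp hr with hr | hr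
        · exact hacc r hr
        · simp at hr; subst hr
          exact ⟨_, _, rfl, by omega⟩
      obtain ⟨h1, h2⟩ := ih _ hacc'
      refine ⟨h1, fun x => ?_⟩
      rw [h2 x, memL_append_one]
      simp only [Covered, List.mem_cons]
      constructor
      · rintro ((h' | h') | h')
        · exact Or.inl h'
        · exact Or.inr ⟨sb, Or.inl rfl, h, h'⟩
        · obtain ⟨q, hq, hq2⟩ := h'; exact Or.inr ⟨q, Or.inr hq, hq2⟩
      · rintro (h' | ⟨q, hq | hq, hq2⟩)
        · exact Or.inl (Or.inl h')
        · subst hq; exact Or.inl (Or.inr hq2.2)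
        · exact Or.inr ⟨q, hq, hq2⟩
    · simp only [if_neg h]
      obtain ⟨h1, h2⟩ := ih acc hacc
      refine ⟨h1, fun x => ?_⟩
      rw [h2 x]
      simp only [Covered, List.mem_cons]
      constructor
      · rintro (h' | ⟨q, hq, hq2⟩)
        · exact Or.inl h'
        · exact Or.inr ⟨q, Or.inr hq, hq2⟩
      · rintro (h' | ⟨q, hq | hq, hq2⟩)
        · exact Or.inl h'
        · subst hq; exact absurd hq2.1 h
        · exact Or.inr ⟨q, hq, hq2⟩

theorem join_go_out : ∀ (t : List (List Int)) (acc : List Int) (out : List (List Int)),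
    join_go t acc out = out ++ join_go t acc [] := by
  intro t
  induction t with
  | nil => intro acc out; simp [join_go]
  | cons cur rest ih =>
    intro acc out
    simp only [join_go]
    split_ifs with h
    · rw [ih _ out, ih _ ([] : List (List Int))]
    · rw [ih cur (out ++ [acc]), ih cur ([] ++ [acc])]
      simp

theorem lex_le_head {a b c d : Int} (h : ([a, b] : List Int) ≤ [c, d]) : a ≤ c := by
  by_contra hc
  exact absurd ((List.Lex.rel (by omega)) : ([c, d] : List Int) < [a, b]) (not_lt.mpr h)

theorem pyGetD_pair_one (a b : Int) : PySem.List.pyGetD ([a, b] : List Int) 1 0 = b := by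
  simp [PySem.List.pyGetD, PySem.List.pyGet?, PySem.List.pyIdx?]

theorem join_spec : ∀ (t : List (List Int)) (a b : Int), a ≤ b → ShapeL t →
    t.Pairwise (fun r s => r.getD 0 0 ≤ s.getD 0 0) →
    (∀ r ∈ t, a ≤ r.getD 0 0) →
    NormL (join_go t [a, b] []) ∧
    (∀ r ∈ join_go t [a, b] [], a ≤ r.getD 0 0) ∧
    ∀ x, (memL x (join_go t [a, b] []) ↔ (a ≤ x ∧ x ≤ b) ∨ memL x t) := by
  intro t
  induction t with
  | nil =>
    intro a b hab _ _ _
    refine ⟨⟨?_, ?_⟩, ?_, fun x => ?_⟩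
    · rintro r hr; simp [join_go] at hr; subst hr; exact ⟨a, b, rfl, hab⟩
    · simp [join_go]
    · rintro r hr; simp [join_go] at hr; subst hr; exact le_refl a
    · simp only [join_go, List.nil_append, memL_cons]
  | cons cur rest ih =>
    intro a b hab hs hpw hlo
    obtain ⟨c, d, rfl, hcd⟩ := hs cur List.mem_cons_self
    have hac : a ≤ c := by have := hlo [c, d] List.mem_cons_self; simpa using this
    have hs' : ShapeL rest := fun r hr => hs r (List.mem_cons_of_mem _ hr)
    have hpw' := (List.pairwise_cons.mp hpw).2
    have hclo : ∀ r ∈ rest, c ≤ r.getD 0 0 := by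
      intro r hr
      have := (List.pairwise_cons.mp hpw).1 r hr
      simpa using this
    simp only [join_go, PySem.List.pyGetD_zero_cons, pyGetD_pair_one]
    have hset : ([a, b] : List Int).set 1 (max b d) = [a, max b d] := rfl
    rw [hset]
    split_ifs with hcb
    · have halo : ∀ r ∈ rest, a ≤ r.getD 0 0 := fun r hr => le_trans hac (hclo r hr)
      obtain ⟨hN, hLo, hM⟩ := ih a (max b d) (le_trans hab (le_max_left b d)) hs' hpw' halo
      refine ⟨hN, hLo, fun x => ?_⟩
      rw [hM x, memL_cons]
      constructor
      · rintro (⟨h1, h2⟩ | h)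
        · rcases le_or_gt x b with hxb | hxb
          · exact Or.inl ⟨h1, hxb⟩
          · exact Or.inr (Or.inl ⟨by omega, by omega⟩)
        · exact Or.inr (Or.inr h)
      · rintro (⟨h1, h2⟩ | ⟨h1, h2⟩ | h)
        · exact Or.inl ⟨h1, le_trans h2 (le_max_left b d)⟩
        · exact Or.inl ⟨by omega, le_trans h2 (le_max_right b d)⟩
        · exact Or.inr h
    · rw [join_go_out rest [c, d] ([] ++ [[a, b]])]
      simp only [List.nil_append, List.singleton_append]
      obtain ⟨⟨hNS, hNP⟩, hLo, hM⟩ := ih c d hcd hs' hpw' hclo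
      have hb2 : b + 2 ≤ c := by omega
      refine ⟨⟨?_, ?_⟩, ?_, fun x => ?_⟩
      · rintro r hr
        rcases List.mem_cons.mp hr with rfl | hr
        · exact ⟨a, b, rfl, hab⟩
        · exact hNS r hr
      · refine List.pairwise_cons.mpr ⟨?_, hNP⟩
        intro r hr
        have := hLo r hr
        rw [show ([a, b] : List Int).getD 1 0 = b from rfl]
        omega
      · rintro r hr
        rcases List.mem_cons.mp hr with rfl | hr
        · exact le_refl a
        · have := hLo r hr; omega
      · rw [memL_cons, hM x, memL_cons]

theorem ranges_covered_spec : Claim_equal_ranges_covered := by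
  intro pairs y _ hpre
  unfold Spec_ranges_covered ranges_covered ranges_covered_alt
  rw [aStep_eq y, bStep_eq y]
  -- A side facts
  obtain ⟨hshape, hmem⟩ := afold y pairs [] (by rintro r hr; simp at hr)
  have hx : ∀ x, memL x (pairs.foldl (aStep y) []) ↔ Covered pairs y x := by
    intro x; rw [hmem x]; exact or_iff_right (memL_nil x)
  -- B side facts
  obtain ⟨hnormP, hmemP⟩ := bfold y pairs []
    ⟨by rintro p hp; simp at hp, List.Pairwise.nil⟩
  have hxB : ∀ x, memP x (pairs.foldl (bStep y) []) ↔ Covered pairs y x := by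
    intro x; rw [hmemP x]
    exact or_iff_right (by rintro ⟨p, hp, -⟩; simp at hp)
  -- the sorted list is nonempty
  obtain ⟨sb, hsb, hle⟩ := hpre
  have hcov : Covered pairs y sb.1.1 :=
    ⟨sb, hsb, by unfold slackOf; omega, by unfold slackOf; omega, by unfold slackOf; omega⟩
  have hperm : (PySem.List.sorted (pairs.foldl (aStep y) []) (fun x => x) false).Perm
      (pairs.foldl (aStep y) []) := PySem.List.sorted_perm _ _ _
  have hmemS : ∀ x, memL x (PySem.List.sorted (pairs.foldl (aStep y) []) (fun x => x) false) ↔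
      Covered pairs y x := fun x => (memL_perm hperm x).trans (hx x)
  have hshapeS : ShapeL (PySem.List.sorted (pairs.foldl (aStep y) []) (fun x => x) false) :=
    fun r hr => hshape r (hperm.mem_iff.mp hr)
  have hpwLe : (PySem.List.sorted (pairs.foldl (aStep y) []) (fun x => x) false).Pairwise
      (fun a b : List Int => a ≤ b) := by
    have h := PySem.List.sorted_pairwise (pairs.foldl (aStep y) []) (fun x : List Int => x)
    convert h using 2
  have hpwLow : (PySem.List.sorted (pairs.foldl (aStep y) []) (fun x => x) false).Pairwise
      (fun r s => r.getD 0 0 ≤ s.getD 0 0) := by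
    refine List.Pairwise.imp_of_mem ?_ hpwLe
    intro r s hr hs hle'
    obtain ⟨a, b, rfl, -⟩ := hshapeS r hr
    obtain ⟨c, d, rfl, -⟩ := hshapeS s hs
    simpa using lex_le_head hle'
  rcases hL : PySem.List.sorted (pairs.foldl (aStep y) []) (fun x => x) false with _ | ⟨h0, t⟩
  · exact absurd ((hmemS sb.1.1).mpr hcov) (by rw [hL]; exact memL_nil _)
  · obtain ⟨a, b, rfl, hab⟩ := hshapeS h0 (by rw [hL]; exact List.mem_cons_self)
    rw [hL] at hmemS hpwLow
    have hst : ShapeL t := fun r hr => hshapeS r (by rw [hL]; exact List.mem_cons_of_mem _ hr)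
    have hlot : ∀ r ∈ t, a ≤ r.getD 0 0 := by
      intro r hr
      have := (List.pairwise_cons.mp hpwLow).1 r hr
      simpa using this
    obtain ⟨hNA, -, hMA⟩ := join_spec t a b hab hst (List.pairwise_cons.mp hpwLow).2 hlot
    have hgoal : join_ranges (pairs.foldl (aStep y) []) = join_go t [a, b] [] := by
      unfold join_ranges
      rw [hL]
    rw [hgoal]
    refine normL_unique _ _ hNA (normL_map hnormP) ?_
    intro x
    rw [hMA x, memL_map _ _, hxB x]
    rw [show ((a ≤ x ∧ x ≤ b) ∨ memL x t) ↔ memL x ([a, b] :: t) from (memL_cons x a b t).symm]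
    exact hmemS x

theorem ranges_covered_raises : Claim_raises_ranges_covered := by
  unfold Claim_raises_ranges_covered
  constructor
  · rintro pairs y _ hR ⟨sb, hm, hle⟩
    have := hR sb hm
    omega
  · refine ⟨by decide, ?_, by decide⟩
    intro sb h
    simp [pvRaiseWitness_ranges_covered] at h

-- self-check: at the recorded raise witness the exclusion really applies (instantiates the theorem above)
theorem ranges_covered_raises_ok :
    ¬ Pre_ranges_covered pvRaiseWitness_ranges_covered.1 pvRaiseWitness_ranges_covered.2 :=
  ranges_covered_raises.1 pvRaiseWitness_ranges_covered.1 pvRaiseWitness_ranges_covered.2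
    (by decide) ranges_covered_raises.2.2.1
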